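-- pv_equiv track=rewrite | github.com/FabioHAraujo/ScienceComputerDegree | TopicosAvancComp/Semana 2/sorted2.py | classifica
-- ===== SOURCE A (Python) =====
-- def classifica(lista):
--     ouro = ('ouro', 200)
--     prata = ('prata', 210)
--     bronze = ('bronze', 220)
--     for i in lista:
--         if i[1] < ouro[1]:
--             bronze = prata
--             prata = ouro
--             ouro = i
--         elif i[1] < prata[1]:
--             bronze = prata
--             prata = i
--         elif i[1] < bronze[1]:
--             bronze = i
--     return (ouro, prata, bronze)
-- ===== SOURCE B (Python) =====
-- def classifica(lista):
--     seeds = [('ouro', 200), ('prata', 210), ('bronze', 220)]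
--     t = sorted(seeds + list(lista), key=lambda x: x[1])
--     return (t[0], t[1], t[2])
-- ===== Notes on version B (the rewrite author's own statement) =====
-- stated objective: idiomatic
-- what changed: Replaces the hand-rolled running top-3 selection loop with a single stable sort (sentinels prepended so ties resolve like the strict '<' displacement) followed by slicing the first three entries.
import Mathlib
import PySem

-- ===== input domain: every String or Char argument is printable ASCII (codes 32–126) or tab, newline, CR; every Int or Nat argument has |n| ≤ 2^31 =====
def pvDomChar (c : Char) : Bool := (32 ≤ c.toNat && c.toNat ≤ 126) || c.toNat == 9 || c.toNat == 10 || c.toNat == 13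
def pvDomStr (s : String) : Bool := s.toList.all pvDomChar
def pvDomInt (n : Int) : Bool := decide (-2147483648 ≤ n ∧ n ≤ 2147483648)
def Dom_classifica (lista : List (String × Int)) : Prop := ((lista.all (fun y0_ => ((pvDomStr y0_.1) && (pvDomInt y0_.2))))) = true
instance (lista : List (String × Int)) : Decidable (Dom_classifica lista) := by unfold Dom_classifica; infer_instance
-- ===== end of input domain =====

-- B replaces A's running top-3 selection loop with a stable sort of sentinels ++ input
-- followed by taking the first three entries (more idiomatic; not faster).


-- ===== PORT A =====
def classificaStep (st : (String × Int) × (String × Int) × (String × Int)) (i : String × Int) :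
    (String × Int) × (String × Int) × (String × Int) :=
  let (ouro, prata, bronze) := st
  if i.2 < ouro.2 then (i, ouro, prata)
  else if i.2 < prata.2 then (ouro, i, prata)
  else if i.2 < bronze.2 then (ouro, prata, i)
  else (ouro, prata, bronze)

def classifica (lista : List (String × Int)) : (String × Int) × (String × Int) × (String × Int) :=
  lista.foldl classificaStep (("ouro", 200), ("prata", 210), ("bronze", 220))

-- ===== PORT B =====
def classifica_alt (lista : List (String × Int)) : (String × Int) × (String × Int) × (String × Int) :=
  let seeds : List (String × Int) := [("ouro", 200), ("prata", 210), ("bronze", 220)]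
  let t := PySem.List.sorted (seeds ++ lista) (fun x => x.2) false
  (PySem.List.pyGetD t 0 ("", 0), PySem.List.pyGetD t 1 ("", 0), PySem.List.pyGetD t 2 ("", 0))

-- ===== PRECONDITION & SPEC =====
def Spec_classifica (lista : List (String × Int)) (out : (String × Int) × (String × Int) × (String × Int)) : Prop := out = classifica_alt lista
instance (lista : List (String × Int)) (out : (String × Int) × (String × Int) × (String × Int)) : Decidable (Spec_classifica lista out) := by unfold Spec_classifica; infer_instance

-- ===== CLAIM (what is proved, stated in full; the proofs are below) =====
def Claim_equal_classifica : Prop := ∀ (lista : List (String × Int)), Dom_classifica lista → Spec_classifica lista (classifica lista)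

-- ===== LEMMAS AND PROOFS =====

-- One-step unfolding of PySem's stable insert on a nonempty accumulator.
theorem insertBy_cons {α : Type} (before : α → α → Bool) (x y : α) (ys : List α) :
    PySem.List.insertBy before x (y :: ys) =
      if before x y then x :: y :: ys else y :: PySem.List.insertBy before x ys := rfl

-- The invariant tying A's running triple to B's insertion-sort accumulator: folding the
-- stable-insert over any accumulator whose first three entries are (o, p, b) keeps the
-- first three entries equal to A's running triple, whatever lies behind them.
theorem classifica_inv (l : List (String × Int)) :
    ∀ (o p b : String × Int) (rest : List (String × Int)),
      ∃ rest' : List (String × Int),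
        l.foldl (fun acc x => PySem.List.insertBy (fun a b => decide (a.2 < b.2)) x acc)
            (o :: p :: b :: rest)
          = (l.foldl classificaStep (o, p, b)).1 :: (l.foldl classificaStep (o, p, b)).2.1 ::
              (l.foldl classificaStep (o, p, b)).2.2 :: rest' := by
  induction l with
  | nil => intro o p b rest; exact ⟨rest, rfl⟩
  | cons i l ih =>
    intro o p b rest
    simp only [List.foldl_cons, insertBy_cons]
    unfold classificaStep
    by_cases h1 : i.2 < o.2
    · simp only [h1, decide_true, if_true]
      exact ih i o p (b :: rest)
    · simp only [h1, decide_false, Bool.false_eq_true, if_false]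
      by_cases h2 : i.2 < p.2
      · simp only [h2, decide_true, if_true]
        exact ih o i p (b :: rest)
      · simp only [h2, decide_false, Bool.false_eq_true, if_false]
        by_cases h3 : i.2 < b.2
        · simp only [h3, decide_true, if_true]
          exact ih o p i (b :: rest)
        · simp only [h3, decide_false, Bool.false_eq_true, if_false]
          exact ih o p b (PySem.List.insertBy (fun a b => decide (a.2 < b.2)) i rest)

-- ===== VERDICT (by name: the statement is the Claim_ definition above) =====
theorem classifica_spec : Claim_equal_classifica := by
  intro lista _
  unfold Spec_classifica classifica
  show _ = (PySem.List.pyGetD (PySem.List.sorted ([(("ouro":String), (200:Int)), ("prata", 210), ("bronze", 220)] ++ lista) (fun x => x.2) false) 0 ("", 0), PySem.List.pyGetD (PySem.List.sorted ([(("ouro":String), (200:Int)), ("prata", 210), ("bronze", 220)] ++ lista) (fun x => x.2) false) 1 ("", 0),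
            PySem.List.pyGetD (PySem.List.sorted ([(("ouro":String), (200:Int)), ("prata", 210), ("bronze", 220)] ++ lista) (fun x => x.2) false) 2 ("", 0))
  rw [PySem.List.sorted_eq_foldl_insertBy, List.foldl_append]
  obtain ⟨rest', hr⟩ := classifica_inv lista ("ouro", 200) ("prata", 210) ("bronze", 220) []
  rw [show (List.foldl (fun acc x => PySem.List.insertBy (fun a b => decide (a.2 < b.2)) x acc) []
        [(("ouro":String), (200:Int)), ("prata", 210), ("bronze", 220)])
      = [("ouro", 200), ("prata", 210), ("bronze", 220)] from rfl, hr]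
  simp [PySem.List.pyGetD, PySem.List.pyGet?, PySem.List.pyIdx?,
    show (0:Int) ≤ (rest'.length:Int) + 1 + 1 by omega,
    show (0:Int) ≤ (rest'.length:Int) + 1 by omega,
    show (2:Int) ≤ (rest'.length:Int) + 1 + 1 by omega]
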